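-- pv_equiv track=rewrite | github.com/hust-open-atom-club/linux-edu-rank | zyz/git_university_stats/university_list.py | _find_university_by_domain
-- ===== SOURCE A (Python) =====
-- def _find_university_by_domain(domain, uni_list):
--     for university in uni_list:
--         if domain in university["domains"]:
--             return university
--     for university in uni_list:
--         for raw_domain in university["domains"]:
--             if domain.endswith(raw_domain) or raw_domain.endswith(domain):
--                 return university
--     return None
-- ===== SOURCE B (Python) =====
-- def _find_university_by_domain(domain, uni_list):
--     fallback = None
--     for university in uni_list:
--         domains = university["domains"]
--         if domain in domains:
--             return university
--         if fallback is None and any(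
--             domain.endswith(raw) or raw.endswith(domain) for raw in domains
--         ):
--             fallback = university
--     return fallback
-- ===== Notes on version B (the rewrite author's own statement) =====
-- stated objective: alternative
-- what changed: Replaces A's two full passes (exact-match pass, then suffix-match pass) by a single pass that returns on the first exact match and records the first suffix match in a fallback variable returned after the loop.
import Mathlib
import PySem

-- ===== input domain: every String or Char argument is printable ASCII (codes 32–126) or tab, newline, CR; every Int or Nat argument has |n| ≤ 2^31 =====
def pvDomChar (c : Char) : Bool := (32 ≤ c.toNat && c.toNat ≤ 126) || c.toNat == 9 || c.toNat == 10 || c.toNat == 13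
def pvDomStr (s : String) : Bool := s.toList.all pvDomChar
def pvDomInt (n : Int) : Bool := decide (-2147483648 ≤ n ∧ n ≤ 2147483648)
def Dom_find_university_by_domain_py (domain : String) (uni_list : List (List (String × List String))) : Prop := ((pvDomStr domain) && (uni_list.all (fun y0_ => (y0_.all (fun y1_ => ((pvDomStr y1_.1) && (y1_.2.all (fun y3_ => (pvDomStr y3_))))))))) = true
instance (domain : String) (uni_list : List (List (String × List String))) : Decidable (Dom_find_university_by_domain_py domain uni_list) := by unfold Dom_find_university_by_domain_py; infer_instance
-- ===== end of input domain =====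

-- ===== PORT A =====
-- B is a one-pass re-decomposition of A's two passes (exact match first, suffix match as a
-- fallback); equal return values are proved on lists whose dicts all carry the "domains" key.

-- helper shared by both ports: the suffix test of A's inner loop / B's any(...)
def pvSuff (domain : String) (doms : List String) : Bool :=
  doms.any (fun raw => PySem.Str.endswith domain raw || PySem.Str.endswith raw domain)

-- A, first pass: return the first university with an exact domain match
def pvLoop1 (domain : String) :
    List (List (String × List String)) → Option (List (String × List String))
  | [] => none
  | u :: rest =>
    match (PySem.Dict.mk u).get? "domains" with
    | none => none  -- KeyError in Python; excluded by Pre_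
    | some doms => if doms.contains domain then some u else pvLoop1 domain rest

-- A, second pass: return the first university with a suffix match
def pvLoop2 (domain : String) :
    List (List (String × List String)) → Option (List (String × List String))
  | [] => none
  | u :: rest =>
    match (PySem.Dict.mk u).get? "domains" with
    | none => none  -- KeyError in Python; excluded by Pre_
    | some doms => if pvSuff domain doms then some u else pvLoop2 domain rest

def find_university_by_domain_py (domain : String)
    (uni_list : List (List (String × List String))) : Option (List (String × List String)) :=
  match pvLoop1 domain uni_list with
  | some u => some u
  | none => pvLoop2 domain uni_list

-- ===== PORT B =====
-- B's single loop, carrying the fallback variable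
def pvLoopB (domain : String) (fallback : Option (List (String × List String))) :
    List (List (String × List String)) → Option (List (String × List String))
  | [] => fallback
  | u :: rest =>
    match (PySem.Dict.mk u).get? "domains" with
    | none => fallback  -- KeyError in Python; excluded by Pre_
    | some doms =>
      if doms.contains domain then some u
      else pvLoopB domain
        (if fallback.isNone && pvSuff domain doms then some u else fallback) rest

def find_university_by_domain_py_alt (domain : String)
    (uni_list : List (List (String × List String))) : Option (List (String × List String)) :=
  pvLoopB domain none uni_list

-- ===== PRECONDITION & SPEC =====
def pvHasKey (u : List (String × List String)) : Bool :=
  ((PySem.Dict.mk u).get? "domains").isSome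

-- Pre_ excludes exactly the inputs where Python raises KeyError: some dict lacks the
-- "domains" key and no exact match occurs at or before it in the first pass.
def Pre_find_university_by_domain_py (domain : String)
    (uni_list : List (List (String × List String))) : Prop :=
  (∀ u ∈ uni_list, pvHasKey u = true) ∨
  (∃ i < uni_list.length, (∀ u ∈ uni_list.take (i + 1), pvHasKey u = true) ∧
    domain ∈ ((PySem.Dict.mk (uni_list.getD i [])).get? "domains").getD [])
instance (domain : String) (uni_list : List (List (String × List String))) : Decidable (Pre_find_university_by_domain_py domain uni_list) := by unfold Pre_find_university_by_domain_py; infer_instance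

def pvWitness_find_university_by_domain_py : String × (List (List (String × List String))) :=
  ("x.edu", [[("domains", ["a.edu", "edu"])], [("domains", ["x.edu"])]])

def Spec_find_university_by_domain_py (domain : String) (uni_list : List (List (String × List String))) (out : Option (List (String × List String))) : Prop := out = find_university_by_domain_py_alt domain uni_list
instance (domain : String) (uni_list : List (List (String × List String))) (out : Option (List (String × List String))) : Decidable (Spec_find_university_by_domain_py domain uni_list out) := by unfold Spec_find_university_by_domain_py; infer_instance

-- ===== CLAIM (what is proved, stated in full; the proofs are below) =====
def Claim_equal_find_university_by_domain_py : Prop := ∀ (domain : String) (uni_list : List (List (String × List String))), Dom_find_university_by_domain_py domain uni_list → Pre_find_university_by_domain_py domain uni_list → Spec_find_university_by_domain_py domain uni_list (find_university_by_domain_py domain uni_list)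

-- ===== LEMMAS AND PROOFS =====

-- B's loop equals: first exact match, else the pending fallback, else A's suffix pass.
theorem pvLoopB_eq (domain : String) (l : List (List (String × List String)))
    (h : ∀ u ∈ l, pvHasKey u = true)
    (fb : Option (List (String × List String))) :
    pvLoopB domain fb l = (pvLoop1 domain l).or (fb.or (pvLoop2 domain l)) := by
  induction l generalizing fb with
  | nil => simp [pvLoopB, pvLoop1, pvLoop2]
  | cons u rest ih =>
    have hu := h u (by simp)
    obtain ⟨doms, hd⟩ := Option.isSome_iff_exists.mp (by simpa [pvHasKey] using hu)
    have hrest : ∀ v ∈ rest, pvHasKey v = true :=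
      fun v hv => h v (by simp [hv])
    by_cases hc : domain ∈ doms
    · simp [pvLoopB, pvLoop1, hd, hc]
    · rw [show pvLoopB domain fb (u :: rest) =
            pvLoopB domain (if fb.isNone && pvSuff domain doms then some u else fb) rest by
          simp [pvLoopB, hd, hc]]
      rw [ih hrest]
      simp only [pvLoop1, pvLoop2, hd]
      cases fb with
      | some f => simp [hc]
      | none =>
        by_cases hs : pvSuff domain doms = true <;> simp [hs, hc]

-- If an exact match occurs with every dict up to it carrying the key, B's loop
-- returns A's first-pass result (whatever fallback is pending), and that result is some _.
theorem pvLoopB_exact (domain : String) :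
    ∀ (l : List (List (String × List String))),
    (∃ i < l.length, (∀ u ∈ l.take (i + 1), pvHasKey u = true) ∧
      domain ∈ ((PySem.Dict.mk (l.getD i [])).get? "domains").getD []) →
    ∀ fb, pvLoopB domain fb l = pvLoop1 domain l ∧ (pvLoop1 domain l).isSome = true := by
  intro l
  induction l with
  | nil => rintro ⟨i, hi, _⟩; simp at hi
  | cons u rest ih =>
    rintro ⟨i, hi, hkeys, hmem⟩ fb
    have hku : pvHasKey u = true := hkeys u (by simp [List.take_succ_cons])
    obtain ⟨doms, hd⟩ := Option.isSome_iff_exists.mp hku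
    by_cases hc : domain ∈ doms
    · constructor <;> simp [pvLoopB, pvLoop1, hd, hc]
    · cases i with
      | zero => simp [hd] at hmem; exact absurd hmem hc
      | succ k =>
        have hrest : ∃ j < rest.length, (∀ v ∈ rest.take (j + 1), pvHasKey v = true) ∧
            domain ∈ ((PySem.Dict.mk (rest.getD j [])).get? "domains").getD [] := by
          refine ⟨k, by simpa using hi, ?_, by simpa using hmem⟩
          intro v hv
          exact hkeys v (by simp [List.take_succ_cons]; right; exact hv)
        obtain ⟨h1, h2⟩ := ih hrest (if fb.isNone && pvSuff domain doms then some u else fb)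
        constructor
        · simpa [pvLoopB, pvLoop1, hd, hc] using h1
        · simpa [pvLoop1, hd, hc] using h2

-- ===== VERDICT (by name: the statement is the Claim_ definition above) =====
theorem find_university_by_domain_py_spec : Claim_equal_find_university_by_domain_py := by
  intro domain uni_list _ hpre
  unfold Spec_find_university_by_domain_py find_university_by_domain_py find_university_by_domain_py_alt
  cases hpre with
  | inl hall =>
    rw [pvLoopB_eq domain uni_list hall none]
    cases pvLoop1 domain uni_list <;> simp [Option.or]
  | inr hex =>
    obtain ⟨h1, h2⟩ := pvLoopB_exact domain uni_list hex none
    obtain ⟨v, hv⟩ := Option.isSome_iff_exists.mp h2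
    rw [h1, hv]
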